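-- pv_equiv track=rewrite | github.com/Joelj17/examen354 | Pregunta 3/pregunta3.py | llega_meta
-- ===== SOURCE A (Python) =====
-- def llega_meta(ind):
--
--
--   for i in range(len(ind)):
--     a=ind[len(ind)-i-1]
--     if a==0:
--       continue
--     elif a==4:
--       return True
--     else:
--       return False
-- ===== SOURCE B (Python) =====
-- def llega_meta(ind):
--     nz = [x for x in ind if x != 0]
--     if not nz:
--         return None
--     return nz[-1] == 4
-- ===== Notes on version B (the rewrite author's own statement) =====
-- stated objective: simpler
-- what changed: Replaces the index-arithmetic backward early-exit scan with a forward filter of the nonzero elements followed by a single last-element check.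
import Mathlib
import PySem

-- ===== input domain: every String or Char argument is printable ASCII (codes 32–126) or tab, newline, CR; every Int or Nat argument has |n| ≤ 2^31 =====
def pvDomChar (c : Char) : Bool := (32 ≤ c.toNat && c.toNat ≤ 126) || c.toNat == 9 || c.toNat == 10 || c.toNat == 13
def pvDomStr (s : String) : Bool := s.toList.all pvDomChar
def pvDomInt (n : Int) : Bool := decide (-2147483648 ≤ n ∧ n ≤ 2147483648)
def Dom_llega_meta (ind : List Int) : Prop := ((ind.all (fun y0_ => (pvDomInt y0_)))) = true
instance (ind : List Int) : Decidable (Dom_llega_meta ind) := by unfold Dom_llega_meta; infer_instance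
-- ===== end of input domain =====

-- B is a simpler decomposition of the same O(n) task: filter the nonzero elements forward, then check the last one.

-- ===== PORT A =====
-- the 'for i in range(len(ind))' loop with early returns, as recursion over the index list
def llegaLoop (ind : List Int) : List Int → Option Bool
  | [] => none
  | i :: rest =>
    match PySem.List.pyGet? ind ((ind.length : Int) - i - 1) with
    | none => none
    | some a =>
      if a = 0 then llegaLoop ind rest
      else if a = 4 then some true
      else some false

def llega_meta (ind : List Int) : Option Bool :=
  llegaLoop ind (PySem.List.pyRange 0 ind.length 1)

-- ===== PORT B =====
def llega_meta_alt (ind : List Int) : Option Bool :=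
  let nz := ind.filter (fun x => x ≠ 0)
  if nz = [] then none
  else
    match PySem.List.pyGet? nz (-1) with
    | none => none
    | some x => some (decide (x = 4))

-- ===== PRECONDITION & SPEC =====
def Spec_llega_meta (ind : List Int) (out : Option Bool) : Prop := out = llega_meta_alt ind
instance (ind : List Int) (out : Option Bool) : Decidable (Spec_llega_meta ind out) := by unfold Spec_llega_meta; infer_instance

-- ===== CLAIM (what is proved, stated in full; the proofs are below) =====
def Claim_equal_llega_meta : Prop := ∀ (ind : List Int), Dom_llega_meta ind → Spec_llega_meta ind (llega_meta ind)

-- ===== LEMMAS AND PROOFS =====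

-- A's backward scan, expressed as a structural scan of the reversed list
def scanRev : List Int → Option Bool
  | [] => none
  | a :: t => if a = 0 then scanRev t else if a = 4 then some true else some false

theorem llegaLoop_eq_scanRev (ind : List Int) (k : Nat) (hk : k ≤ ind.length) :
    llegaLoop ind (PySem.List.pyRange ((ind.length : Int) - k) ind.length 1)
      = scanRev ((ind.take k).reverse) := by
  induction k with
  | zero => simp [llegaLoop, scanRev]
  | succ k ih =>
    have hk' : k < ind.length := by omega
    have hlt : (ind.length : Int) - ((k : Int) + 1) < (ind.length : Int) := by omega
    push_cast
    rw [PySem.List.pyRange_one_cons hlt, llegaLoop]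
    have harith : (ind.length : Int) - ((ind.length : Int) - ((k : Int) + 1)) - 1 = (k : Int) := by ring
    rw [harith, PySem.List.pyGet?_natCast]
    have htake : (ind.take (k + 1)).reverse = ind[k] :: (ind.take k).reverse := by
      rw [List.take_add_one]; simp [hk']
    rw [htake]
    simp only [List.getElem?_eq_getElem hk']
    rw [scanRev]
    split_ifs with h0 h4
    · rw [show ((ind.length : Int) - ((k : Int) + 1) + 1) = (ind.length : Int) - (k : Int) by ring]
      exact ih (by omega)
    · rfl
    · rfl

theorem scanRev_eq_filter_head (l : List Int) :
    scanRev l = (l.filter (fun x => x ≠ 0)).head?.map (fun x => decide (x = 4)) := by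
  induction l with
  | nil => simp [scanRev]
  | cons a t ih =>
    by_cases h : a = 0
    · simp [scanRev, h, ih]
    · simp [scanRev, h]
      split_ifs with h4 <;> simp [h4]

-- ===== VERDICT (by name: the statement is the Claim_ definition above) =====
theorem llega_meta_spec : Claim_equal_llega_meta := by
  intro ind _
  unfold Spec_llega_meta llega_meta llega_meta_alt
  have h := llegaLoop_eq_scanRev ind ind.length le_rfl
  simp only [Int.sub_self] at h
  rw [h, List.take_length, scanRev_eq_filter_head, List.filter_reverse, List.head?_reverse]
  simp only [PySem.List.pyGet?_neg_one]
  generalize List.filter (fun x => decide (x ≠ 0)) ind = nz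
  cases nz with
  | nil => simp
  | cons a t =>
    cases hL : (a :: t).getLast? with
    | none => simp at hL
    | some x => simp
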